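-- pv_equiv track=rewrite | github.com/MatheusLucaLima/FirstSemesterPUCC | Sistema de Sustentabilidade Pessoal.py | transformar_em_blocos
-- ===== SOURCE A (Python) =====
-- def texto_para_numeros(texto): # Função 1 de transformar letra para numero.
--     """
--         no if se encontrar a letra z ele transforma em 0.
--         no else [ord(letra)] retorna o codigo unicode da letra, subitrai por 97.
--         Para que assim a=1,b=2,c=3,...y=0, transformando o texto em numero.
--     """
--     letra_transformado_numero = []
--     for letra in texto:
--         if letra=='z':
--             letra_transformado_numero.append(0)
--         else:
--             letra_transformado_numero.append((ord(letra)+1) - ord('a'))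
--     return letra_transformado_numero
--
-- def transformar_em_blocos(texto, tamanho_bloco): # Função 3 de transformar os numeros (letra convertidos para numeros) em matriz
--     """
--     Converter o texto em numeros utilizando a função 1
--     Coloca 0 (ou a letra z) se o numero de letra (que foram convertidos em numero) for impar
--     Separa em blocos de tamanho 2
--     """
--     matriz_2x1 = []
--     numeros = texto_para_numeros(texto)
--     if len(numeros) % 2 != 0:
--         numeros.append(0)
--     for i in range(0, len(numeros), 2):
--         matriz_2x1.append(numeros[i:i+2])
--     return matriz_2x1
-- ===== SOURCE B (Python) =====
-- def transformar_em_blocos(texto, tamanho_bloco):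
--     # Single pass: convert each letter and group into pairs as we go,
--     # padding a trailing odd element with 0.
--     resultado = []
--     par = []
--     for letra in texto:
--         par.append(0 if letra == 'z' else ord(letra) - 96)
--         if len(par) == 2:
--             resultado.append(par)
--             par = []
--     if par:
--         par.append(0)
--         resultado.append(par)
--     return resultado
-- ===== Notes on version B (the rewrite author's own statement) =====
-- stated objective: simpler
-- what changed: B fuses A's two passes (convert-all then pad-and-slice by index ranges) into one pass over the characters that fills a 2-element pair buffer and flushes it into the result, padding a leftover element with 0 at the end.
import Mathlib
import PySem

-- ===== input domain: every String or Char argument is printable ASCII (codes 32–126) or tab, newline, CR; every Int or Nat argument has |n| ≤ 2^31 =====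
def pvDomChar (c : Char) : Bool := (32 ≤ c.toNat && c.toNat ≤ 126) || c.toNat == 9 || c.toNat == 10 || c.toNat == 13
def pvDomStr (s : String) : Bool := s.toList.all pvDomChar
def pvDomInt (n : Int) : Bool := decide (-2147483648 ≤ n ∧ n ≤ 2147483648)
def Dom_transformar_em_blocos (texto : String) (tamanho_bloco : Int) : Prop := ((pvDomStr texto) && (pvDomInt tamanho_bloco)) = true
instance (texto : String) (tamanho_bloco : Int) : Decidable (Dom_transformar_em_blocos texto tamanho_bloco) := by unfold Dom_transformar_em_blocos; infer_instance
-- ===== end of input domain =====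

-- B replaces A's convert-then-slice two-pass structure by a single pass with a pair buffer (objective: simpler).

-- ===== PORT A =====
def texto_para_numeros (texto : String) : List Int :=
  texto.toList.foldl
    (fun acc letra =>
      if letra = 'z' then acc ++ [(0 : Int)]
      else acc ++ [((letra.toNat : Int) + 1) - 97]) []

def transformar_em_blocos (texto : String) (tamanho_bloco : Int) : List (List Int) :=
  let numeros0 := texto_para_numeros texto
  let numeros := if (numeros0.length : Int) % 2 ≠ 0 then numeros0 ++ [0] else numeros0
  (PySem.List.pyRange 0 (numeros.length : Int) 2).foldl
    (fun acc i => acc ++ [PySem.List.slice numeros (some i) (some (i + 2))]) []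

-- ===== PORT B =====
def pvNumB (c : Char) : Int := if c = 'z' then 0 else (c.toNat : Int) - 96

def pvStepB (st : List (List Int) × List Int) (c : Char) : List (List Int) × List Int :=
  let par := st.2 ++ [pvNumB c]
  if par.length == 2 then (st.1 ++ [par], []) else (st.1, par)

def transformar_em_blocos_alt (texto : String) (tamanho_bloco : Int) : List (List Int) :=
  let st := texto.toList.foldl pvStepB ([], [])
  if st.2 ≠ [] then st.1 ++ [st.2 ++ [0]] else st.1

-- ===== PRECONDITION & SPEC =====
def Spec_transformar_em_blocos (texto : String) (tamanho_bloco : Int) (out : List (List Int)) : Prop := out = transformar_em_blocos_alt texto tamanho_bloco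
instance (texto : String) (tamanho_bloco : Int) (out : List (List Int)) : Decidable (Spec_transformar_em_blocos texto tamanho_bloco out) := by unfold Spec_transformar_em_blocos; infer_instance

-- ===== CLAIM (what is proved, stated in full; the proofs are below) =====
def Claim_equal_transformar_em_blocos : Prop := ∀ (texto : String) (tamanho_bloco : Int), Dom_transformar_em_blocos texto tamanho_bloco → Spec_transformar_em_blocos texto tamanho_bloco (transformar_em_blocos texto tamanho_bloco)

-- ===== LEMMAS AND PROOFS =====

-- Reference pairing function both ports are reduced to.
def pvPairs : List Int → List (List Int)
  | [] => []
  | [a] => [[a, 0]]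
  | a :: b :: t => [a, b] :: pvPairs t

theorem pvNumA_eq (c : Char) :
    (if c = 'z' then (0 : Int) else ((c.toNat : Int) + 1) - 97) = pvNumB c := by
  unfold pvNumB; split <;> omega

theorem texto_para_numeros_eq (texto : String) :
    texto_para_numeros texto = texto.toList.map pvNumB := by
  unfold texto_para_numeros
  rw [PySem.List.foldl_congr_mem
    (l := texto.toList) (init := ([] : List Int))
    (f := fun acc letra =>
      if letra = 'z' then acc ++ [(0 : Int)] else acc ++ [((letra.toNat : Int) + 1) - 97])
    (g := fun acc letra => acc ++ [pvNumB letra])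
    (by intro acc x _; simp only [← pvNumA_eq x]; split <;> simp_all)]
  rw [PySem.List.foldl_append_singleton_eq_map]
  simp

-- B's single pass computes pvPairs.
theorem pvBfold : ∀ (cs : List Char) (res : List (List Int)),
    (let st := cs.foldl pvStepB (res, []);
     if st.2 ≠ [] then st.1 ++ [st.2 ++ [0]] else st.1) = res ++ pvPairs (cs.map pvNumB)
  | [], res => by simp [pvPairs]
  | [c], res => by simp [pvStepB, pvPairs]
  | c1 :: c2 :: t, res => by
    have ih := pvBfold t (res ++ [[pvNumB c1, pvNumB c2]])
    simpa [pvStepB, pvPairs, List.foldl_cons] using ih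

-- Even-length chunking by index equals pvPairs.
theorem pvChunk_even : ∀ (m : Nat) (ns : List Int), ns.length = 2 * m →
    (List.range m).map (fun k => (ns.drop (2 * k)).take 2) = pvPairs ns
  | 0, ns, h => by
    have : ns = [] := List.eq_nil_of_length_eq_zero (by omega)
    simp [this, pvPairs]
  | m + 1, [], h => by simp at h
  | m + 1, [a], h => by simp at h; omega
  | m + 1, a :: b :: t, h => by
    have ih := pvChunk_even m t (by simp at h; omega)
    rw [List.range_succ_eq_map, List.map_cons, List.map_map]
    refine congrArg₂ (· :: ·) (by norm_num) ?_
    calc List.map ((fun k => (List.drop (2 * k) (a :: b :: t)).take 2) ∘ Nat.succ) (List.range m)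
        = List.map (fun k => (List.drop (2 * k) t).take 2) (List.range m) := by
          refine List.map_congr_left ?_
          intro k _
          show (List.drop (2 * (k + 1)) (a :: b :: t)).take 2 = (List.drop (2 * k) t).take 2
          have h2 : 2 * (k + 1) = (2 * k) + 1 + 1 := by ring
          rw [h2, List.drop_succ_cons, List.drop_succ_cons]
      _ = pvPairs t := ih

-- Padding an odd-length list with 0 does not change pvPairs.
theorem pvPairs_pad : ∀ (ns : List Int), ns.length % 2 = 1 → pvPairs (ns ++ [0]) = pvPairs ns
  | [], h => by simp at h
  | [a], _ => rfl
  | a :: b :: t, h => by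
    have := pvPairs_pad t (by simp at h; omega)
    simp [pvPairs, this]

-- A's index/slice chunking of the padded list equals pvPairs.
theorem pvChunkA_even (ns : List Int) (m : Nat) (h : ns.length = 2 * m) :
    (PySem.List.pyRange 0 (ns.length : Int) 2).foldl
      (fun acc i => acc ++ [PySem.List.slice ns (some i) (some (i + 2))]) []
    = pvPairs ns := by
  rw [PySem.List.foldl_append_singleton_eq_map, PySem.List.pyRange_of_pos _ _ (by norm_num)]
  have hcount : (if (0 : Int) < (ns.length : Int) then
      (((ns.length : Int) - 0 + 2 - 1) / 2).toNat else 0) = m := by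
    split <;> omega
  rw [hcount, List.map_map, ← pvChunk_even m ns h]
  refine List.map_congr_left ?_
  intro k _
  show PySem.List.slice ns (some ((0 : Int) + 2 * (k : Int))) (some ((0 : Int) + 2 * (k : Int) + 2))
      = (ns.drop (2 * k)).take 2
  have e0 : (0 : Int) + 2 * (k : Int) = ((2 * k : Nat) : Int) := by push_cast; ring
  rw [e0]
  rw [show ((2 * k : Nat) : Int) + 2 = ((2 * k : Nat) : Int) + ((2 : Nat) : Int) by norm_num]
  rw [PySem.List.slice_natCast_add]

theorem pvChunkA_eq (ns : List Int) :
    (PySem.List.pyRange 0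
        (((if (ns.length : Int) % 2 ≠ 0 then ns ++ [0] else ns).length : Int)) 2).foldl
      (fun acc i => acc ++
        [PySem.List.slice (if (ns.length : Int) % 2 ≠ 0 then ns ++ [0] else ns)
          (some i) (some (i + 2))]) []
    = pvPairs ns := by
  by_cases hp : (ns.length : Int) % 2 ≠ 0
  · rw [if_pos hp]
    have hodd : ns.length % 2 = 1 := by omega
    rw [pvChunkA_even (ns ++ [0]) ((ns.length + 1) / 2) (by simp; omega)]
    exact pvPairs_pad ns hodd
  · rw [if_neg hp]
    exact pvChunkA_even ns (ns.length / 2) (by omega)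

-- ===== VERDICT (by name: the statement is the Claim_ definition above) =====
theorem transformar_em_blocos_spec : Claim_equal_transformar_em_blocos := by
  intro texto tamanho_bloco _
  unfold Spec_transformar_em_blocos
  have hB : transformar_em_blocos_alt texto tamanho_bloco
      = pvPairs (texto.toList.map pvNumB) := by
    unfold transformar_em_blocos_alt
    simpa using pvBfold texto.toList []
  have hA : transformar_em_blocos texto tamanho_bloco
      = pvPairs (texto.toList.map pvNumB) := by
    show (PySem.List.pyRange 0
        ((((if ((texto_para_numeros texto).length : Int) % 2 ≠ 0
            then texto_para_numeros texto ++ [0] else texto_para_numeros texto)).length : Int)) 2).foldl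
      (fun acc i => acc ++
        [PySem.List.slice
          (if ((texto_para_numeros texto).length : Int) % 2 ≠ 0
            then texto_para_numeros texto ++ [0] else texto_para_numeros texto)
          (some i) (some (i + 2))]) []
      = pvPairs (texto.toList.map pvNumB)
    rw [texto_para_numeros_eq]
    exact pvChunkA_eq _
  rw [hA, hB]
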